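-- pv_equiv track=rewrite | github.com/CodyNing/HammingCode | hamming_correct.py | getm
-- ===== SOURCE A (Python) =====
-- def getm(i, length):
--     x = 2 ** i
--     diff =  2 ** (i + 1) - 2 ** i
--     res = [x]
--     while 1:
--         x += 1
--         if not (x & (1 << i)):
--             x += diff
--         if x > length:
--             break
--         # res.append('{0:b}'.format(x))
--         res.append(x)
--     return res
-- ===== SOURCE B (Python) =====
-- def getm(i, length):
--     half = 1 << i
--     res = [half]
--     # rest of the first block of numbers with bit i set, capped at length
--     res.extend(range(half + 1, min(2 * half - 1, length) + 1))
--     base = 3 * half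
--     while base <= length:
--         res.extend(range(base, min(base + half - 1, length) + 1))
--         base += 2 * half
--     return res
-- ===== Notes on version B (the rewrite author's own statement) =====
-- stated objective: alternative
-- what changed: A walks a counter one number at a time, bit-testing each candidate and jumping over blocks where bit i is clear; B emits each aligned block of bit-i-set numbers wholesale as a range (first block, then 2*half-strided block starts), with no per-number bit test.
import Mathlib
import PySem

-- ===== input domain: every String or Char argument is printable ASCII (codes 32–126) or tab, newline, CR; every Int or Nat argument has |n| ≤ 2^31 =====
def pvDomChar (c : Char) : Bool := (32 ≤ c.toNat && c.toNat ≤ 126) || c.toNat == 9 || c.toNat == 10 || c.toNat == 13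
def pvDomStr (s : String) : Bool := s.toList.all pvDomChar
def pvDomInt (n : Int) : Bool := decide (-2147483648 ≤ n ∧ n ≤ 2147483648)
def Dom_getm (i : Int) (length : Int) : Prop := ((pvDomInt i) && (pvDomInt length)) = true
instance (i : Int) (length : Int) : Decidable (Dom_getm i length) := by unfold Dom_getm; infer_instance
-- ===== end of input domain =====

-- B emits each block of numbers with bit i set as one range, instead of A's per-number counter walk.

-- ===== PORT A =====
-- A's while-loop; `diff = 2**(i+1) - 2**i` is a pure value of i, recomputed here (identical value).
-- `x & (1 << i)` is ported as `Int.land x (1 <<< i.toNat)` — exact for i ≥ 0 (Pre_; Python raises for i < 0).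
def getmLoop (i length x : Int) (res : List Int) : List Int :=
  let diff : Int := 2 ^ (i + 1).toNat - 2 ^ i.toNat
  let x1 := x + 1
  let x2 := if Int.land x1 ((1 : Int) <<< i.toNat) = 0 then x1 + diff else x1
  if x2 > length then res
  else getmLoop i length x2 (res ++ [x2])
termination_by (length + 1 - x).toNat
decreasing_by
  have hd : (0:Int) ≤ 2 ^ (i + 1).toNat - 2 ^ i.toNat := by
    have : (2:Int) ^ i.toNat ≤ 2 ^ (i + 1).toNat :=
      pow_le_pow_right₀ (by norm_num) (by omega)
    omega
  simp only [x2, x1, diff] at *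
  by_cases hc : Int.land (x + 1) ((1 : Int) <<< i.toNat) = 0 <;>
    simp only [hc, dif_pos, dif_neg, not_false_iff, not_lt] at * <;> omega

-- `2 ** i` ported as `2 ^ i.toNat` — exact for i ≥ 0 (Pre_).
def getm (i : Int) (length : Int) : List Int :=
  let x : Int := 2 ^ i.toNat
  getmLoop i length x [x]

-- ===== PORT B =====
-- B's while-loop over block starts; `half = 1 << i` is a pure value of i, recomputed here (identical value).
def getmAltLoop (i length base : Int) (res : List Int) : List Int :=
  let half : Int := 2 ^ i.toNat
  if base ≤ length then
    getmAltLoop i length (base + 2 * half)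
      (res ++ PySem.List.pyRange base (min (base + half - 1) length + 1) 1)
  else res
termination_by (length + 1 - base).toNat
decreasing_by
  have h1 : (0:Int) < 2 ^ i.toNat := pow_pos (by norm_num) _
  omega

def getm_alt (i : Int) (length : Int) : List Int :=
  let half : Int := 2 ^ i.toNat
  getmAltLoop i length (3 * half)
    (half :: PySem.List.pyRange (half + 1) (min (2 * half - 1) length + 1) 1)

-- ===== PRECONDITION & SPEC =====
-- Pre_ excludes i < 0, where Python A raises (ValueError: negative shift count); B raises there too.
def Pre_getm (i : Int) (length : Int) : Prop := 0 ≤ i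
instance (i : Int) (length : Int) : Decidable (Pre_getm i length) := by unfold Pre_getm; infer_instance
def pvWitness_getm : Int × Int := (2, 30)
def Spec_getm (i : Int) (length : Int) (out : List Int) : Prop := out = getm_alt i length
instance (i : Int) (length : Int) (out : List Int) : Decidable (Spec_getm i length out) := by unfold Spec_getm; infer_instance

-- ===== CLAIM (what is proved, stated in full; the proofs are below) =====
def Claim_equal_getm : Prop := ∀ (i : Int) (length : Int), Dom_getm i length → Pre_getm i length → Spec_getm i length (getm i length)

-- ===== LEMMAS AND PROOFS =====
theorem one_shiftLeft_int (t : Nat) : ((1:Int) <<< t) = ((2^t : Nat) : Int) := by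
  show Int.shiftLeft 1 t = _
  simp [Int.shiftLeft, Nat.shiftLeft_eq]
theorem land_natCast (a b : Nat) : Int.land (a:Int) (b:Int) = ((a &&& b : Nat) : Int) := rfl
theorem cond_set (t k r : Nat) (hr : r < 2^t) :
    ¬ Int.land ((2*k+1)*2^t + (r:Int)) ((1:Int) <<< t) = 0 := by
  have hp : 0 < 2^t := Nat.two_pow_pos t
  have e : (2*k+1)*2^t + (r:Int) = (((2*k+1)*2^t + r : Nat) : Int) := by push_cast; ring
  rw [e, one_shiftLeft_int, land_natCast]
  have hdiv : ((2*k+1)*2^t + r) / 2^t = 2*k+1 := by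
    rw [add_comm, Nat.add_mul_div_right _ _ hp, Nat.div_eq_of_lt hr, Nat.zero_add]
  have htb : ((2*k+1)*2^t + r).testBit t = true := by
    rw [Nat.testBit_eq_decide_div_mod_eq, hdiv]
    simp
  rw [Nat.and_two_pow, htb]
  simp
theorem cond_clear (t k : Nat) :
    Int.land ((2*k+2)*2^t) ((1:Int) <<< t) = 0 := by
  have hp : 0 < 2^t := Nat.two_pow_pos t
  have e : (2*k+2)*2^t = (((2*k+2)*2^t : Nat) : Int) := by push_cast; ring
  rw [e, one_shiftLeft_int, land_natCast]
  have hdiv : ((2*k+2)*2^t) / 2^t = 2*k+2 := Nat.mul_div_cancel _ hp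
  have htb : ((2*k+2)*2^t).testBit t = false := by
    rw [Nat.testBit_eq_decide_div_mod_eq, hdiv]
    simp
  rw [Nat.and_two_pow, htb]
  simp

theorem cond_set_int (t : Nat) (k : Int) (hk : 0 ≤ k) (r : Nat) (hr : r < 2^t) :
    ¬ Int.land ((2*k+1)*2^t + (r:Int)) ((1:Int) <<< t) = 0 := by
  obtain ⟨kN, rfl⟩ := Int.eq_ofNat_of_zero_le hk
  exact cond_set t kN r hr
theorem cond_clear_int (t : Nat) (k : Int) (hk : 0 ≤ k) :
    Int.land ((2*k+2)*2^t) ((1:Int) <<< t) = 0 := by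
  obtain ⟨kN, rfl⟩ := Int.eq_ofNat_of_zero_le hk
  exact cond_clear t kN
theorem diff_eq (i : Int) (hi : 0 ≤ i) : (2:Int) ^ (i + 1).toNat - 2 ^ i.toNat = 2 ^ i.toNat := by
  have : (i + 1).toNat = i.toNat + 1 := by omega
  rw [this, pow_succ]; ring

theorem blockW (i length : Int) (hi : 0 ≤ i) (n : Nat) :
    ∀ (k : Int), 0 ≤ k → ∀ (r : Nat) (res : List Int), 2^i.toNat - 1 - r = n → r < 2^i.toNat →
    getmLoop i length ((2*k+1)*2^i.toNat + (r:Int)) res =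
      if (2*k+2)*2^i.toNat - 1 ≤ length then
        getmLoop i length ((2*k+2)*2^i.toNat - 1)
          (res ++ PySem.List.pyRange ((2*k+1)*2^i.toNat + (r:Int) + 1) ((2*k+2)*2^i.toNat) 1)
      else res ++ PySem.List.pyRange ((2*k+1)*2^i.toNat + (r:Int) + 1) (length + 1) 1 := by
  have hH : (1:Int) ≤ 2 ^ i.toNat := one_le_pow₀ (by norm_num)
  induction n with
  | zero =>
    intro k hk r res hn hr
    have hre : (r:Int) = 2^i.toNat - 1 := by
      have h1 : (1:Nat) ≤ 2^i.toNat := Nat.two_pow_pos i.toNat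
      have : r = 2^i.toNat - 1 := by omega
      subst this; push_cast [h1]; ring
    have hx : (2*k+1)*2^i.toNat + (r:Int) = (2*k+2)*2^i.toNat - 1 := by
      rw [hre]; ring
    rw [hx]
    split_ifs with hc
    · rw [PySem.List.pyRange_one_eq_nil (by omega : (2*k+2)*2^i.toNat ≤ (2*k+2)*2^i.toNat - 1 + 1)]
      simp
    · rw [getmLoop]
      rw [show (2*k+2)*2^i.toNat - 1 + 1 = (2*k+2)*2^i.toNat by ring]
      rw [if_pos (cond_clear_int i.toNat k hk), diff_eq i hi]
      rw [if_pos (by omega : (2*k+2)*2^i.toNat + 2^i.toNat > length)]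
      rw [PySem.List.pyRange_one_eq_nil (by omega)]
      simp
  | succ n IH =>
    intro k hk r res hn hr
    have hr1 : r + 1 < 2^i.toNat := by omega
    have hr1i : ((r:Int) + 1) < (2:Int)^i.toNat := by exact_mod_cast hr1
    push_cast at hr1i
    have hexp : (2*k+2)*2^i.toNat = (2*k+1)*2^i.toNat + 2^i.toNat := by ring
    rw [getmLoop]
    rw [show (2*k+1)*2^i.toNat + (r:Int) + 1 = (2*k+1)*2^i.toNat + ((r+1 : Nat):Int) by push_cast; ring]
    rw [if_neg (cond_set_int i.toNat k hk (r+1) hr1)]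
    have hcast : ((r+1 : Nat):Int) = (r:Int) + 1 := by push_cast; ring
    by_cases hgt : (2*k+1)*2^i.toNat + ((r+1 : Nat):Int) > length
    · rw [if_pos hgt]
      rw [hcast] at hgt
      rw [if_neg (by rw [not_le]; linarith : ¬ (2*k+2)*2^i.toNat - 1 ≤ length)]
      rw [PySem.List.pyRange_one_eq_nil (by linarith)]
      simp
    · rw [if_neg hgt]
      rw [hcast] at hgt
      rw [not_lt] at hgt
      rw [IH k hk (r+1) (res ++ [(2*k+1)*2^i.toNat + ((r+1:Nat):Int)]) (by omega) hr1]
      rw [hcast]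
      split_ifs with hc
      · rw [List.append_assoc, List.singleton_append,
          ← PySem.List.pyRange_one_cons (by linarith)]
      · rw [List.append_assoc, List.singleton_append,
          ← PySem.List.pyRange_one_cons (by linarith)]

theorem blocks (i length : Int) (hi : 0 ≤ i) :
    ∀ (m : Nat) (k : Int), 0 ≤ k → ∀ (res : List Int),
    (length + 1 - (2*k+3)*2^i.toNat).toNat = m →
    getmLoop i length ((2*k+2)*2^i.toNat - 1) res
      = getmAltLoop i length ((2*k+3)*2^i.toNat) res := by
  have hH : (1:Int) ≤ 2 ^ i.toNat := one_le_pow₀ (by norm_num)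
  intro m
  induction m using Nat.strong_induction_on with
  | _ m IH =>
  intro k hk res hm
  have e1 : (2*(k+1)+3)*(2:Int)^i.toNat = (2*k+3)*2^i.toNat + 2*2^i.toNat := by ring
  have e2 : (2*(k+1)+1)*(2:Int)^i.toNat + ((0:Nat):Int) = (2*k+3)*2^i.toNat := by push_cast; ring
  have e3 : (2*(k+1)+2)*(2:Int)^i.toNat - 1 = (2*k+3)*2^i.toNat + 2^i.toNat - 1 := by ring
  rw [getmLoop]
  rw [show (2*k+2)*(2:Int)^i.toNat - 1 + 1 = (2*k+2)*2^i.toNat by ring]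
  rw [if_pos (cond_clear_int i.toNat k hk), diff_eq i hi]
  rw [show (2*k+2)*(2:Int)^i.toNat + 2^i.toNat = (2*k+3)*2^i.toNat by ring]
  rw [getmAltLoop]
  by_cases hb : (2*k+3)*(2:Int)^i.toNat ≤ length
  · rw [if_neg (not_lt.mpr hb), if_pos hb]
    conv_lhs => rw [show (2*k+3)*(2:Int)^i.toNat = (2*(k+1)+1)*2^i.toNat + ((0:Nat):Int) by push_cast; ring]
    rw [blockW i length hi (2^i.toNat - 1) (k+1) (by omega) 0 _ (by omega) (Nat.two_pow_pos _)]
    rw [e2]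
    split_ifs with hC
    · rw [e3] at hC
      rw [List.append_assoc, List.singleton_append,
        ← PySem.List.pyRange_one_cons (by linarith)]
      rw [IH (length + 1 - (2*(k+1)+3)*2^i.toNat).toNat (by omega) (k+1) (by omega) _ rfl]
      rw [min_eq_left (by linarith : (2*k+3)*(2:Int)^i.toNat + 2^i.toNat - 1 ≤ length)]
      rw [e1, show (2*(k+1)+2)*(2:Int)^i.toNat = (2*k+3)*2^i.toNat + 2^i.toNat - 1 + 1 by ring]
    · rw [e3] at hC
      rw [not_le] at hC
      rw [List.append_assoc, List.singleton_append,
        ← PySem.List.pyRange_one_cons (by linarith)]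
      rw [min_eq_right (by linarith : length ≤ (2*k+3)*(2:Int)^i.toNat + 2^i.toNat - 1)]
      rw [getmAltLoop]
      rw [if_neg (by linarith : ¬ (2*k+3)*(2:Int)^i.toNat + 2*2^i.toNat ≤ length)]
  · rw [if_pos (by omega : (2*k+3)*(2:Int)^i.toNat > length), if_neg hb]

-- ===== VERDICT (by name: the statement is the Claim_ definition above) =====
theorem getm_spec : Claim_equal_getm := by
  intro i length _ hi
  have hi' : (0:Int) ≤ i := hi
  unfold Spec_getm
  have hH : (1:Int) ≤ 2 ^ i.toNat := one_le_pow₀ (by norm_num)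
  simp only [getm, getm_alt]
  conv_lhs => rw [show (2:Int)^i.toNat = (2*(0:Int)+1)*2^i.toNat + ((0:Nat):Int) by push_cast; ring]
  rw [blockW i length hi' (2^i.toNat - 1) 0 le_rfl 0 _ (by omega) (Nat.two_pow_pos _)]
  rw [show (2*(0:Int)+1)*(2:Int)^i.toNat + ((0:Nat):Int) = 2^i.toNat by push_cast; ring]
  rw [show (2*(0:Int)+2)*(2:Int)^i.toNat - 1 = 2*2^i.toNat - 1 by ring]
  rw [show (2*(0:Int)+2)*(2:Int)^i.toNat = 2*2^i.toNat by ring]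
  split_ifs with hc
  · conv_lhs => rw [show (2:Int)*2^i.toNat - 1 = (2*(0:Int)+2)*2^i.toNat - 1 by ring]
    rw [blocks i length hi' _ 0 le_rfl _ rfl]
    rw [show (2*(0:Int)+3)*(2:Int)^i.toNat = 3*2^i.toNat by ring]
    rw [min_eq_left hc]
    rw [show (2:Int)*2^i.toNat - 1 + 1 = 2*2^i.toNat by ring]
    rw [List.singleton_append]
  · rw [min_eq_right (by linarith)]
    rw [getmAltLoop]
    rw [if_neg (by linarith : ¬ (3:Int)*2^i.toNat ≤ length)]
    rw [List.singleton_append]
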